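-- pv_equiv track=rewrite | github.com/sadhurshan/esai | ai_microservice/app.py | _friendly_default_message
-- ===== SOURCE A (Python) =====
-- from typing import Any, Callable, Dict, List, Literal, Optional, Sequence
--
-- def _friendly_default_message(query: Optional[str]) -> str:
--     normalized = (query or "").strip().lower()
--     greeting_terms = [
--         "hi",
--         "hello",
--         "hey",
--         "good morning",
--         "good afternoon",
--         "good evening",
--         "greetings",
--     ]
--     if normalized:
--         for term in greeting_terms:
--             if normalized == term or normalized.startswith(f"{term} "):
--                 return "Hello! How can I help you today?"
--
--     if not normalized:
--         return "Hello! How can I help you today?"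
--
--     return (
--         "Not enough information in workspace data for that yet, but I am ready to chat and help with RFQs, "
--         "quotes, suppliers, or general questions. What should we tackle?"
--     )
-- ===== SOURCE B (Python) =====
-- _GREETING = "Hello! How can I help you today?"
-- _FALLBACK = (
--     "Not enough information in workspace data for that yet, but I am ready to chat and help with RFQs, "
--     "quotes, suppliers, or general questions. What should we tackle?"
-- )
--
--
-- def _first_word(s):
--     """Split s at its first space: (word, remainder). No space -> (s, "")."""
--     i = s.find(" ")
--     if i < 0:
--         return s, ""
--     return s[:i], s[i + 1:]
--
--
-- def _friendly_default_message(query):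
--     normalized = (query or "").strip().lower()
--     if not normalized:
--         return _GREETING
--     first, rest = _first_word(normalized)
--     if first in ("hi", "hello", "hey", "greetings"):
--         return _GREETING
--     if first == "good" and _first_word(rest)[0] in ("morning", "afternoon", "evening"):
--         return _GREETING
--     return _FALLBACK
-- ===== Notes on version B (the rewrite author's own statement) =====
-- stated objective: alternative
-- what changed: A scans all seven greeting terms, testing each for full equality or as a space-followed prefix of the query; B instead extracts the first one or two space-separated words once (via str.find and slicing) and tests them for set membership, so the per-term prefix scan disappears.
import Mathlib
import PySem

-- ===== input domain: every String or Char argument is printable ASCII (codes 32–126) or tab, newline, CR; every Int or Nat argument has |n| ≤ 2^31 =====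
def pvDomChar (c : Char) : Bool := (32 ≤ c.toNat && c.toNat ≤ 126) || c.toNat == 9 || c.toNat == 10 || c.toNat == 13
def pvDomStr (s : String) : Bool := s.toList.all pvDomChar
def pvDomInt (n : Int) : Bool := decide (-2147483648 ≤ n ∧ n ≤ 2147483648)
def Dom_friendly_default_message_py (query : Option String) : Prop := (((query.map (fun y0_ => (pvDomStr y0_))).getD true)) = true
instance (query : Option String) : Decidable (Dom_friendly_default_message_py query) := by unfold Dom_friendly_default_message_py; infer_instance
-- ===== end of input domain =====

-- B replaces A's scan over seven greeting terms (equality / 'term '-prefix test for each) by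
-- extracting the first one or two space-separated words once and testing set membership
-- (objective: simpler / idiomatic; no speed claim).

-- ===== PORT A =====
-- the early-return 'for term in greeting_terms' loop of A
def fdmTermMatch (normalized : List Char) : List (List Char) → Bool
  | [] => false
  | t :: rest =>
      (normalized == t || PySem.Chars.startswith normalized (t ++ " ".toList))
        || fdmTermMatch normalized rest

def friendly_default_message_py (query : Option String) : String :=
  let normalized := PySem.Chars.lower (PySem.Chars.strip (query.getD "").toList)
  let greeting_terms := ["hi".toList, "hello".toList, "hey".toList,
    "good morning".toList, "good afternoon".toList, "good evening".toList, "greetings".toList]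
  if !normalized.isEmpty && fdmTermMatch normalized greeting_terms then
    "Hello! How can I help you today?"
  else if normalized.isEmpty then
    "Hello! How can I help you today?"
  else
    "Not enough information in workspace data for that yet, but I am ready to chat and help with RFQs, quotes, suppliers, or general questions. What should we tackle?"

-- ===== PORT B =====
-- Source B's _first_word: split s at its first space into (word, remainder)
def fdmFirstWord (s : List Char) : List Char × List Char :=
  let i := PySem.Chars.find s " ".toList
  if i < 0 then (s, [])
  else (PySem.List.slice s none (some i), PySem.List.slice s (some (i + 1)) none)

def friendly_default_message_py_alt (query : Option String) : String :=
  let normalized := PySem.Chars.lower (PySem.Chars.strip (query.getD "").toList)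
  if normalized.isEmpty then
    "Hello! How can I help you today?"
  else
    let fw := fdmFirstWord normalized
    if ["hi".toList, "hello".toList, "hey".toList, "greetings".toList].contains fw.1 then
      "Hello! How can I help you today?"
    else if fw.1 == "good".toList
        && ["morning".toList, "afternoon".toList, "evening".toList].contains (fdmFirstWord fw.2).1 then
      "Hello! How can I help you today?"
    else
      "Not enough information in workspace data for that yet, but I am ready to chat and help with RFQs, quotes, suppliers, or general questions. What should we tackle?"

-- ===== PRECONDITION & SPEC =====
def Spec_friendly_default_message_py (query : Option String) (out : String) : Prop := out = friendly_default_message_py_alt query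
instance (query : Option String) (out : String) : Decidable (Spec_friendly_default_message_py query out) := by unfold Spec_friendly_default_message_py; infer_instance

-- ===== CLAIM (what is proved, stated in full; the proofs are below) =====
def Claim_equal_friendly_default_message_py : Prop := ∀ (query : Option String), Dom_friendly_default_message_py query → Spec_friendly_default_message_py query (friendly_default_message_py query)

-- ===== LEMMAS AND PROOFS =====

-- a space-free Boolean check gives the Prop form the token lemmas need
theorem fdm_nosp (t : List Char) (h : t.all (· != ' ') = true) : ∀ c ∈ t, c ≠ ' ' :=
  fun c hc => by simpa using List.all_eq_true.mp h c hc

-- if dropWhile produces a cons, its head fails the predicate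
theorem fdm_dropWhile_head {α : Type} (p : α → Bool) :
    ∀ (l : List α) (c : α) (r : List α), l.dropWhile p = c :: r → p c = false := by
  intro l
  induction l with
  | nil => intro c r h; simp [List.dropWhile] at h
  | cons a t ih =>
      intro c r h
      by_cases hp : p a = true
      · rw [List.dropWhile_cons_of_pos hp] at h; exact ih c r h
      · rw [List.dropWhile_cons_of_neg (by simpa using hp)] at h
        cases h; simpa using hp

-- takeWhile/dropWhile at the first failing index
theorem fdm_tw_take (p : Char → Bool) :
    ∀ (s : List Char) (k : Nat), s[k]? = some ' ' → p ' ' = false →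
      (∀ j, j < k → ∀ c, s[j]? = some c → p c = true) →
      s.takeWhile p = s.take k ∧ s.dropWhile p = s.drop k := by
  intro s
  induction s with
  | nil => intro k h _ _; simp at h
  | cons a t ih =>
      intro k hk hsp hlt
      cases k with
      | zero =>
          simp at hk; subst hk
          constructor
          · rw [List.takeWhile_cons_of_neg (by simpa using hsp)]; simp
          · rw [List.dropWhile_cons_of_neg (by simpa using hsp)]; simp
      | succ j =>
          have ha : p a = true := hlt 0 (Nat.succ_pos j) a rfl
          have := ih j (by simpa using hk) hsp
            (fun m hm c hc => hlt (m + 1) (by omega) c (by simpa using hc))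
          constructor
          · rw [List.takeWhile_cons_of_pos ha]; simp [this.1]
          · rw [List.dropWhile_cons_of_pos ha]; simpa using this.2

-- Source B's _first_word in takeWhile/dropWhile form
theorem fdm_firstWord_eq (s : List Char) :
    fdmFirstWord s = (s.takeWhile (· != ' '), (s.dropWhile (· != ' ')).drop 1) := by
  unfold fdmFirstWord
  have hsep : " ".toList = [' '] := rfl
  have hge : -1 ≤ PySem.Chars.find s " ".toList := PySem.Chars.neg_one_le_find _ _
  by_cases hneg : PySem.Chars.find s " ".toList < 0
  · have h1 : PySem.Chars.find s " ".toList = -1 := by omega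
    have hni : ¬ (" ".toList <:+: s) := (PySem.Chars.find_eq_neg_one_iff _ _).mp h1
    have hall : ∀ c ∈ s, (c != ' ') = true := by
      intro c hc
      by_contra hcc
      have hc' : c = ' ' := by simpa using hcc
      subst hc'
      obtain ⟨l1, l2, hl⟩ := List.append_of_mem hc
      exact hni ⟨l1, l2, by rw [hsep, hl]; simp⟩
    rw [if_pos hneg, List.takeWhile_eq_self_iff.mpr hall,
        List.dropWhile_eq_nil_iff.mpr hall]
    rfl
  · have hpos : 0 ≤ PySem.Chars.find s " ".toList := by omega
    set i := PySem.Chars.find s " ".toList with hi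
    obtain ⟨hpre, hmin⟩ := PySem.Chars.find_spec (s := s) (sub := " ".toList) hpos
    set k := i.toNat with hk
    have hgetk : s[k]? = some ' ' := by
      obtain ⟨r, hr⟩ := hpre
      have : s.drop k = ' ' :: r := by rw [← hr, hsep]; rfl
      have h0 : (s.drop k)[0]? = some ' ' := by rw [this]; rfl
      simpa using h0
    have hlt : ∀ j, j < k → ∀ c, s[j]? = some c → (c != ' ') = true := by
      intro j hj c hgc
      by_contra hcc
      have hc' : c = ' ' := by simpa using hcc
      subst hc'
      have hjlen : j < s.length := (List.getElem?_eq_some_iff.mp hgc).1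
      have hgj : s[j] = ' ' := by
        have := List.getElem?_eq_getElem (l := s) (i := j) hjlen
        rw [this] at hgc; exact Option.some.inj hgc
      refine hmin j hj ⟨s.drop (j + 1), ?_⟩
      rw [hsep]
      calc [' '] ++ s.drop (j + 1) = s[j] :: s.drop (j + 1) := by rw [hgj]; rfl
        _ = s.drop j := List.getElem_cons_drop ..
    obtain ⟨htw, hdw⟩ := fdm_tw_take (· != ' ') s k hgetk (by simp) hlt
    rw [if_neg hneg, htw, hdw,
        PySem.List.slice_to s hpos, PySem.List.slice_from s (by omega : (0:Int) ≤ i + 1)]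
    have h1 : (i + 1).toNat = k + 1 := by omega
    rw [h1, List.drop_drop]

-- splitting at the space after a space-free block
theorem fdm_tok_split (t m : List Char) (hsp : ∀ c ∈ t, c ≠ ' ') :
    (t ++ ' ' :: m).takeWhile (· != ' ') = t ∧ (t ++ ' ' :: m).dropWhile (· != ' ') = ' ' :: m := by
  have hall : ∀ c ∈ t, (c != ' ') = true := fun c hc => by simpa using hsp c hc
  constructor
  · rw [List.takeWhile_append, if_pos (by rw [List.takeWhile_eq_self_iff.mpr hall]),
        List.takeWhile_cons_of_neg (by simp)]
    simp
  · rw [List.dropWhile_append, List.dropWhile_eq_nil_iff.mpr hall]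
    rw [List.dropWhile_cons_of_neg (by simp)]
    rfl

-- one-word greeting term: first word equals t iff A's (n = t or 't ' prefix) test holds
theorem fdm_tok_iff (t n : List Char) (ht : t ≠ []) (hsp : ∀ c ∈ t, c ≠ ' ') :
    n.takeWhile (· != ' ') = t ↔ (n = t ∨ t ++ [' '] <+: n) := by
  constructor
  · intro h
    have hsplit := List.takeWhile_append_dropWhile (p := (· != ' ')) (l := n)
    cases hd : n.dropWhile (· != ' ') with
    | nil => left; rw [← hsplit, h, hd, List.append_nil]
    | cons c r =>
        right
        have hc : (c != ' ') = false := fdm_dropWhile_head _ n c r hd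
        have hc' : c = ' ' := by simpa using hc
        refine ⟨r, ?_⟩
        rw [← hsplit, h, hd, hc']
        simp
  · intro h
    rcases h with h | h
    · subst h
      exact List.takeWhile_eq_self_iff.mpr (fun c hc => by simpa using hsp c hc)
    · obtain ⟨r, hr⟩ := h
      have hn : n = t ++ ' ' :: r := by rw [← hr]; simp
      rw [hn]
      exact (fdm_tok_split t r hsp).1

-- two-word greeting term
theorem fdm_tok2_iff (t x n : List Char) (ht : t ≠ []) (hx : x ≠ [])
    (hspt : ∀ c ∈ t, c ≠ ' ') (hspx : ∀ c ∈ x, c ≠ ' ') :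
    (n.takeWhile (· != ' ') = t ∧ ((n.dropWhile (· != ' ')).drop 1).takeWhile (· != ' ') = x)
      ↔ (n = t ++ ' ' :: x ∨ (t ++ ' ' :: x ++ [' ']) <+: n) := by
  constructor
  · rintro ⟨h1, h2⟩
    rcases (fdm_tok_iff t n ht hspt).mp h1 with hnt | hpre
    · exfalso
      subst hnt
      rw [List.dropWhile_eq_nil_iff.mpr (fun c hc => by simpa using hspt c hc)] at h2
      simp at h2
      exact hx h2
    · obtain ⟨r, hr⟩ := hpre
      have hn : n = t ++ ' ' :: r := by rw [← hr]; simp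
      rw [hn, (fdm_tok_split t r hspt).2] at h2
      simp only [List.drop_succ_cons, List.drop_zero] at h2
      rcases (fdm_tok_iff x r hx hspx).mp h2 with hrx | hpre2
      · left; rw [hn, hrx]
      · right
        obtain ⟨r2, hr2⟩ := hpre2
        refine ⟨r2, ?_⟩
        rw [hn, ← hr2]
        simp
  · intro h
    rcases h with h | h
    · rw [h, (fdm_tok_split t (x) hspt).1, (fdm_tok_split t x hspt).2]
      simp only [List.drop_succ_cons, List.drop_zero]
      exact ⟨by trivial, List.takeWhile_eq_self_iff.mpr (fun c hc => by simpa using hspx c hc)⟩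
    · obtain ⟨r, hr⟩ := h
      have hn : n = t ++ ' ' :: (x ++ ' ' :: r) := by rw [← hr]; simp
      rw [hn, (fdm_tok_split t (x ++ ' ' :: r) hspt).1, (fdm_tok_split t (x ++ ' ' :: r) hspt).2]
      simp only [List.drop_succ_cons, List.drop_zero]
      exact ⟨by trivial, (fdm_tok_split x r hspx).1⟩

-- A's scan equals B's token tests, on any normalized string
theorem fdm_match_eq (n : List Char) :
    fdmTermMatch n ["hi".toList, "hello".toList, "hey".toList,
        "good morning".toList, "good afternoon".toList, "good evening".toList, "greetings".toList]
      = (["hi".toList, "hello".toList, "hey".toList, "greetings".toList].contains (fdmFirstWord n).1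
         || ((fdmFirstWord n).1 == "good".toList
             && ["morning".toList, "afternoon".toList, "evening".toList].contains
                  (fdmFirstWord (fdmFirstWord n).2).1)) := by
  have h1 := fdm_tok_iff "hi".toList n (by decide) (fdm_nosp _ (by rfl))
  have h2 := fdm_tok_iff "hello".toList n (by decide) (fdm_nosp _ (by rfl))
  have h3 := fdm_tok_iff "hey".toList n (by decide) (fdm_nosp _ (by rfl))
  have h4 := fdm_tok_iff "greetings".toList n (by decide) (fdm_nosp _ (by rfl))
  have g1 := fdm_tok2_iff "good".toList "morning".toList n (by decide) (by decide)
    (fdm_nosp _ (by rfl)) (fdm_nosp _ (by rfl))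
  have g2 := fdm_tok2_iff "good".toList "afternoon".toList n (by decide) (by decide)
    (fdm_nosp _ (by rfl)) (fdm_nosp _ (by rfl))
  have g3 := fdm_tok2_iff "good".toList "evening".toList n (by decide) (by decide)
    (fdm_nosp _ (by rfl)) (fdm_nosp _ (by rfl))
  have hsp' : " ".toList = [' '] := rfl
  have e1 : "good morning".toList = "good".toList ++ ' ' :: "morning".toList := rfl
  have e2 : "good afternoon".toList = "good".toList ++ ' ' :: "afternoon".toList := rfl
  have e3 : "good evening".toList = "good".toList ++ ' ' :: "evening".toList := rfl
  rw [Bool.eq_iff_iff]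
  simp only [fdm_firstWord_eq, fdmTermMatch, Bool.or_eq_true, Bool.and_eq_true, beq_iff_eq,
    PySem.Chars.startswith_iff, List.contains_eq_mem, List.mem_cons, List.not_mem_nil, or_false,
    decide_eq_true_eq, hsp', e1, e2, e3, List.append_assoc, List.cons_append, Bool.false_eq_true]
  constructor
  · rintro ((h | h) | (h | h) | (h | h) | (h | h) | (h | h) | (h | h) | (h | h))
    · exact Or.inl (Or.inl (h1.mpr (Or.inl h)))
    · exact Or.inl (Or.inl (h1.mpr (Or.inr h)))
    · exact Or.inl (Or.inr (Or.inl (h2.mpr (Or.inl h))))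
    · exact Or.inl (Or.inr (Or.inl (h2.mpr (Or.inr h))))
    · exact Or.inl (Or.inr (Or.inr (Or.inl (h3.mpr (Or.inl h)))))
    · exact Or.inl (Or.inr (Or.inr (Or.inl (h3.mpr (Or.inr h)))))
    · obtain ⟨ha, hb⟩ := g1.mpr (Or.inl h); exact Or.inr ⟨ha, Or.inl hb⟩
    · obtain ⟨ha, hb⟩ := g1.mpr (Or.inr h); exact Or.inr ⟨ha, Or.inl hb⟩
    · obtain ⟨ha, hb⟩ := g2.mpr (Or.inl h); exact Or.inr ⟨ha, Or.inr (Or.inl hb)⟩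
    · obtain ⟨ha, hb⟩ := g2.mpr (Or.inr h); exact Or.inr ⟨ha, Or.inr (Or.inl hb)⟩
    · obtain ⟨ha, hb⟩ := g3.mpr (Or.inl h); exact Or.inr ⟨ha, Or.inr (Or.inr hb)⟩
    · obtain ⟨ha, hb⟩ := g3.mpr (Or.inr h); exact Or.inr ⟨ha, Or.inr (Or.inr hb)⟩
    · exact Or.inl (Or.inr (Or.inr (Or.inr (h4.mpr (Or.inl h)))))
    · exact Or.inl (Or.inr (Or.inr (Or.inr (h4.mpr (Or.inr h)))))
  · rintro ((h | h | h | h) | ⟨hg, hm | hm | hm⟩)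
    · rcases h1.mp h with h' | h'
      · exact Or.inl (Or.inl h')
      · exact Or.inl (Or.inr h')
    · rcases h2.mp h with h' | h'
      · exact Or.inr (Or.inl (Or.inl h'))
      · exact Or.inr (Or.inl (Or.inr h'))
    · rcases h3.mp h with h' | h'
      · exact Or.inr (Or.inr (Or.inl (Or.inl h')))
      · exact Or.inr (Or.inr (Or.inl (Or.inr h')))
    · rcases h4.mp h with h' | h'
      · exact Or.inr (Or.inr (Or.inr (Or.inr (Or.inr (Or.inr (Or.inl h'))))))
      · exact Or.inr (Or.inr (Or.inr (Or.inr (Or.inr (Or.inr (Or.inr h'))))))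
    · rcases g1.mp ⟨hg, hm⟩ with h' | h'
      · exact Or.inr (Or.inr (Or.inr (Or.inl (Or.inl h'))))
      · exact Or.inr (Or.inr (Or.inr (Or.inl (Or.inr h'))))
    · rcases g2.mp ⟨hg, hm⟩ with h' | h'
      · exact Or.inr (Or.inr (Or.inr (Or.inr (Or.inl (Or.inl h')))))
      · exact Or.inr (Or.inr (Or.inr (Or.inr (Or.inl (Or.inr h')))))
    · rcases g3.mp ⟨hg, hm⟩ with h' | h'
      · exact Or.inr (Or.inr (Or.inr (Or.inr (Or.inr (Or.inl (Or.inl h'))))))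
      · exact Or.inr (Or.inr (Or.inr (Or.inr (Or.inr (Or.inl (Or.inr h'))))))

-- ===== VERDICT (by name: the statement is the Claim_ definition above) =====
theorem friendly_default_message_py_spec : Claim_equal_friendly_default_message_py := by
  intro query _
  unfold Spec_friendly_default_message_py friendly_default_message_py friendly_default_message_py_alt
  set n := PySem.Chars.lower (PySem.Chars.strip (query.getD "").toList) with hn
  by_cases he : n.isEmpty
  · simp [he]
  · simp only [he, Bool.not_false, Bool.true_and, if_false, Bool.false_eq_true]
    rw [fdm_match_eq n]
    cases hc1 : ["hi".toList, "hello".toList, "hey".toList, "greetings".toList].contains (fdmFirstWord n).1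
      <;> cases hc2 : ((fdmFirstWord n).1 == "good".toList
             && ["morning".toList, "afternoon".toList, "evening".toList].contains
                  (fdmFirstWord (fdmFirstWord n).2).1)
      <;> simp
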